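-- pv_equiv track=rewrite | github.com/officialarijit/officialarijit.github.io | scripts/update_publications.py | compute_metrics_from_publications
-- ===== SOURCE A (Python) =====
-- def compute_metrics_from_publications(publications: list[dict]) -> dict:
--     citations_list = sorted([int(p.get("citations", 0) or 0) for p in publications], reverse=True)
--     total = sum(citations_list)
--     h = 0
--     for i, c in enumerate(citations_list, 1):
--         if c >= i:
--             h = i
--         else:
--             break
--     i10 = sum(1 for c in citations_list if c >= 10)
--     return {"total_citations": total, "h_index": h, "i10_index": i10}
-- ===== SOURCE B (Python) =====
-- def compute_metrics_from_publications(publications: list[dict]) -> dict: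
--     n = len(publications)
--     total = 0
--     i10 = 0
--     count = {}
--     for p in publications:
--         c = int(p.get("citations", 0) or 0)
--         total += c
--         if c >= 10:
--             i10 += 1
--         b = c if c < n else n
--         count[b] = count.get(b, 0) + 1
--     h = 0
--     s = 0
--     k = n
--     while k > 0:
--         s += count.get(k, 0)
--         if s >= k:
--             h = k
--             break
--         k -= 1
--     return {"total_citations": total, "h_index": h, "i10_index": i10}
-- ===== Notes on version B (the rewrite author's own statement) =====
-- stated objective: alternative
-- what changed: replaces the descending sort with a single pass that accumulates total, i10 and a bucket counter of citation counts clipped at n, then finds the h-index by a downward suffix-sum scan over the buckets (counting-sort style, no sort)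
import Mathlib
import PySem

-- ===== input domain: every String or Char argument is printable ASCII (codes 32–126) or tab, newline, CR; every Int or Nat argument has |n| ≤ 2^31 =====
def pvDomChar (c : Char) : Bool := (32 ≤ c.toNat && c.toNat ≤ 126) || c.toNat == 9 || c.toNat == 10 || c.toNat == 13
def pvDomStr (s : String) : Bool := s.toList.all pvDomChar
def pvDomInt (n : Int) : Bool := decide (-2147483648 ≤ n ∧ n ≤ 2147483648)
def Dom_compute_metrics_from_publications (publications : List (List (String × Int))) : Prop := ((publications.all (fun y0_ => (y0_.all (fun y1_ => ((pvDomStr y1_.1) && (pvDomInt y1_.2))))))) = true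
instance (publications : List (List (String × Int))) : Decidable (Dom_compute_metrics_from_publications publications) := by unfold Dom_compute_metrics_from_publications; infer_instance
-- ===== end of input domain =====

-- B replaces A's descending sort by a single counting pass (total, i10, and a bucket
-- counter of citations clipped at n) followed by a downward suffix-sum scan for the
-- h-index; alternative algorithm, same exact results.

-- shared extraction: int(p.get("citations", 0) or 0)  ('or 0' maps 0 to 0, exact)
def pvCit (p : List (String × Int)) : Int :=
  let v := (PySem.Dict.mk p).getD "citations" 0
  if v == 0 then 0 else v

-- ===== PORT A =====
-- the 'for i, c in enumerate(citations_list, 1): if c >= i: h = i else: break' loop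
def pvHLoop : List Int → Int → Int → Int
  | [], _, h => h
  | c :: rest, i, h => if i ≤ c then pvHLoop rest (i + 1) i else h

def compute_metrics_from_publications (publications : List (List (String × Int))) : List (String × Int) :=
  let citations_list := PySem.List.sorted (publications.map pvCit) (fun x => x) true
  let total := citations_list.sum
  let h := pvHLoop citations_list 1 0
  let i10 := (citations_list.map (fun c => if 10 ≤ c then (1 : Int) else 0)).sum
  [("total_citations", total), ("h_index", h), ("i10_index", i10)]

-- ===== PORT B =====
-- the 'while k > 0: s += count.get(k, 0); if s >= k: h = k; break; k -= 1' loop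
def pvScan (count : PySem.Dict Int Int) : Nat → Int → Int
  | 0, _ => 0
  | Nat.succ m, s =>
    let k : Int := (m : Int) + 1
    let s' := s + count.getD k 0
    if k ≤ s' then k else pvScan count m s'

def compute_metrics_from_publications_alt (publications : List (List (String × Int))) : List (String × Int) :=
  let n : Int := publications.length
  let st := publications.foldl
    (fun (st : Int × Int × PySem.Dict Int Int) p =>
      let c := pvCit p
      let b := if c < n then c else n
      (st.1 + c, (if 10 ≤ c then st.2.1 + 1 else st.2.1), st.2.2.insert b (st.2.2.getD b 0 + 1)))
    (0, 0, PySem.Dict.empty)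
  let h := pvScan st.2.2 n.toNat 0
  [("total_citations", st.1), ("h_index", h), ("i10_index", st.2.1)]

-- ===== PRECONDITION & SPEC =====
def Spec_compute_metrics_from_publications (publications : List (List (String × Int))) (out : List (String × Int)) : Prop := out = compute_metrics_from_publications_alt publications
instance (publications : List (List (String × Int))) (out : List (String × Int)) : Decidable (Spec_compute_metrics_from_publications publications out) := by unfold Spec_compute_metrics_from_publications; infer_instance

-- ===== CLAIM (what is proved, stated in full; the proofs are below) =====
def Claim_equal_compute_metrics_from_publications : Prop := ∀ (publications : List (List (String × Int))), Dom_compute_metrics_from_publications publications → Spec_compute_metrics_from_publications publications (compute_metrics_from_publications publications)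

-- ===== LEMMAS AND PROOFS =====

-- counting version of A's h-loop (no break), used only in the proofs
def pvCA : List Int → Int → Int
  | [], _ => 0
  | c :: r, i => (if i ≤ c then 1 else 0) + pvCA r (i + 1)

-- clipping used by B:  b = c if c < n else n
def pvClip (n c : Int) : Int := if c < n then c else n

-- number of elements ≥ k, as an Int
def pvF (l : List Int) (k : Int) : Int := ((l.countP fun c => decide (k ≤ c)) : Int)

theorem pvCA_nonneg (l : List Int) (i : Int) : 0 ≤ pvCA l i := by
  induction l generalizing i with
  | nil => simp [pvCA]
  | cons c r ih =>
    simp only [pvCA]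
    have := ih (i + 1)
    split <;> omega

theorem pvCA_le_length (l : List Int) (i : Int) : pvCA l i ≤ l.length := by
  induction l generalizing i with
  | nil => simp [pvCA]
  | cons c r ih =>
    simp only [pvCA, List.length_cons]
    have := ih (i + 1)
    split <;> push_cast <;> omega

theorem pvCA_eq_zero (l : List Int) (i : Int) (h : ∀ x ∈ l, x < i) : pvCA l i = 0 := by
  induction l generalizing i with
  | nil => rfl
  | cons c r ih =>
    have hc : c < i := h c (by simp)
    simp only [pvCA, if_neg (by omega : ¬ i ≤ c)]
    rw [ih (i + 1) (fun x hx => by have := h x (by simp [hx]); omega)]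
    omega

theorem pvHLoop_eq (l : List Int) (hp : l.Pairwise (fun a b => b ≤ a)) :
    ∀ i : Int, pvHLoop l i (i - 1) = (i - 1) + pvCA l i := by
  induction l with
  | nil => intro i; simp [pvHLoop, pvCA]
  | cons c r ih =>
    intro i
    rcases List.pairwise_cons.mp hp with ⟨hall, hr⟩
    by_cases hc : i ≤ c
    · have : pvHLoop r (i + 1) i = (i + 1 - 1) + pvCA r (i + 1) := by
        have := ih hr (i + 1); simpa using this
      simp only [pvHLoop, pvCA, if_pos hc]
      omega
    · simp only [pvHLoop, pvCA, if_neg hc]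
      rw [pvCA_eq_zero r (i + 1) (fun x hx => by have := hall x hx; omega)]
      omega

theorem pvF_mono (l : List Int) {k k' : Int} (h : k ≤ k') : pvF l k' ≤ pvF l k := by
  unfold pvF
  have := List.countP_mono_left (l := l)
    (p := fun c => decide (k' ≤ c)) (q := fun c => decide (k ≤ c))
    (fun a _ ha => by simp at ha ⊢; omega)
  exact_mod_cast this

theorem pvF_cons (c : Int) (r : List Int) (k : Int) :
    pvF (c :: r) k = (if k ≤ c then 1 else 0) + pvF r k := by
  simp only [pvF, List.countP_cons]
  split
  · simp_all
    omega
  · simp_all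

-- (b): at h = pvCA l i the count of elements ≥ h + i - 1 is at least h
theorem pvCA_lower (l : List Int) (hp : l.Pairwise (fun a b => b ≤ a)) :
    ∀ i : Int, pvCA l i ≤ pvF l (pvCA l i + i - 1) := by
  induction l with
  | nil => intro i; simp [pvCA, pvF]
  | cons c r ih =>
    intro i
    rcases List.pairwise_cons.mp hp with ⟨hall, hr⟩
    by_cases hc : i ≤ c
    · have hIH := ih hr (i + 1)
      set h'' := pvCA r (i + 1) with hh
      have h0 : 0 ≤ h'' := pvCA_nonneg r (i + 1)
      have hthr : h'' + (i + 1) - 1 = h'' + i := by ring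
      rw [hthr] at hIH
      have hcge : h'' + i ≤ c := by
        rcases eq_or_lt_of_le h0 with h0' | h0'
        · omega
        · -- some element of r is ≥ h'' + i, and c dominates r
          have hpos : 0 < r.countP fun x => decide (h'' + i ≤ x) := by
            have : (0 : Int) < pvF r (h'' + i) := by omega
            unfold pvF at this; exact_mod_cast this
          rcases List.countP_pos_iff.mp hpos with ⟨x, hx, hxp⟩
          have := hall x hx
          simp at hxp; omega
      simp only [pvCA, if_pos hc]
      rw [show (1 + h'') + i - 1 = h'' + i by ring, pvF_cons, if_pos hcge]
      omega
    · have hIH := ih hr (i + 1)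
      set h'' := pvCA r (i + 1) with hh
      have hthr : h'' + (i + 1) - 1 = h'' + i := by ring
      rw [hthr] at hIH
      simp only [pvCA, if_neg hc]
      rw [show (0 + h'') + i - 1 = h'' + i - 1 by ring, pvF_cons]
      have := pvF_mono r (show h'' + i - 1 ≤ h'' + i by omega)
      split <;> omega

-- (c): above h = pvCA l i the count drops below the threshold
theorem pvCA_upper (l : List Int) (hp : l.Pairwise (fun a b => b ≤ a)) :
    ∀ i k : Int, pvCA l i < k → pvF l (k + i - 1) < k := by
  induction l with
  | nil =>
    intro i k hk
    simp only [pvCA] at hk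
    simp only [pvF, List.countP_nil]
    omega
  | cons c r ih =>
    intro i k hk
    rcases List.pairwise_cons.mp hp with ⟨hall, hr⟩
    by_cases hc : i ≤ c
    · simp only [pvCA, if_pos hc] at hk
      have hIH := ih hr (i + 1) (k - 1) (by omega)
      rw [show (k - 1) + (i + 1) - 1 = k + i - 1 by ring] at hIH
      rw [pvF_cons]
      split <;> omega
    · -- every element is ≤ c < i ≤ k + i - 1, so the count is 0
      have h0 : 0 ≤ pvCA r (i + 1) := pvCA_nonneg r (i + 1)
      simp only [pvCA, if_neg hc] at hk
      have hz : (c :: r).countP (fun x => decide (k + i - 1 ≤ x)) = 0 := by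
        apply List.countP_eq_zero.mpr
        intro a ha
        rcases List.mem_cons.mp ha with h | h
        · subst h; simp; omega
        · have := hall a h; simp; omega
      unfold pvF; rw [hz]; omega

-- count split:  #{c ≥ k} = #{c = k} + #{c ≥ k+1}
theorem pvF_split (l : List Int) (k : Int) :
    pvF l k = (l.count k : Int) + pvF l (k + 1) := by
  induction l with
  | nil => simp [pvF]
  | cons c r ih =>
    rw [pvF_cons, pvF_cons, List.count_cons, ih]
    by_cases h : c = k
    · subst h; simp; omega
    · simp only [beq_iff_eq, h, if_false]
      split_ifs <;> push_cast <;> omega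

-- clipping at n does not change counts of elements ≥ k for 1 ≤ k ≤ n
theorem pvF_clip (l : List Int) (n k : Int) (hk : k ≤ n) :
    pvF (l.map (pvClip n)) k = pvF l k := by
  unfold pvF
  rw [List.countP_map]
  congr 1
  apply List.countP_congr
  intro c _
  simp [Function.comp, pvClip]
  constructor <;> (intro h; split at * <;> omega)

theorem pvF_clip_top (l : List Int) (n : Int) : pvF (l.map (pvClip n)) (n + 1) = 0 := by
  unfold pvF
  have : (l.map (pvClip n)).countP (fun c => decide (n + 1 ≤ c)) = 0 := by
    apply List.countP_eq_zero.mpr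
    intro a ha
    rcases List.mem_map.mp ha with ⟨x, _, rfl⟩
    unfold pvClip
    split
    · simp
      omega
    · simp
  omega

-- B's single pass, characterised componentwise
theorem pvFold_triple (n : Int) (l : List (List (String × Int))) :
    ∀ (t i : Int) (d : PySem.Dict Int Int),
    l.foldl (fun (st : Int × Int × PySem.Dict Int Int) p =>
      let c := pvCit p
      let b := if c < n then c else n
      (st.1 + c, (if 10 ≤ c then st.2.1 + 1 else st.2.1), st.2.2.insert b (st.2.2.getD b 0 + 1))) (t, i, d)
    = (t + (l.map pvCit).sum,
       i + pvF (l.map pvCit) 10,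
       (l.map (fun p => pvClip n (pvCit p))).foldl (fun d x => d.insert x (d.getD x 0 + 1)) d) := by
  induction l with
  | nil => intro t i d; simp [pvF]
  | cons p r ih =>
    intro t i d
    simp only [List.foldl_cons, List.map_cons, List.sum_cons, List.foldl_cons]
    rw [ih, pvF_cons]
    have hb : (if pvCit p < n then pvCit p else n) = pvClip n (pvCit p) := rfl
    rw [hb]
    simp only [Prod.mk.injEq]
    refine ⟨by ring, by split <;> omega, trivial⟩

-- the downward scan finds exactly the value characterised by (b), (c)
theorem pvScan_eq (cs : List Int) (count : PySem.Dict Int Int) (hA : Int)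
    (hcount : ∀ k : Int, count.getD k 0 = ((cs.map (pvClip cs.length)).count k : Int))
    (hb : hA ≤ pvF cs hA)
    (hc : ∀ k : Int, hA < k → pvF cs k < k)
    (h0 : 0 ≤ hA) :
    ∀ (m : Nat) (s : Int), (m : Int) ≤ cs.length → hA ≤ (m : Int) →
      s = pvF (cs.map (pvClip cs.length)) ((m : Int) + 1) →
      pvScan count m s = hA := by
  intro m
  induction m with
  | zero => intro s _ hm _; simp [pvScan]; omega
  | succ m ih =>
    intro s hmn hm hs
    push_cast at hmn hm hs
    have hk1 : ((m : Int) + 1) ≤ (cs.length : Int) := by omega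
    have hsplit := pvF_split (cs.map (pvClip cs.length)) ((m : Int) + 1)
    have hclip := pvF_clip cs (cs.length) ((m : Int) + 1) hk1
    have hs' : s + count.getD ((m : Int) + 1) 0 = pvF cs ((m : Int) + 1) := by
      rw [hcount]; omega
    simp only [pvScan]
    by_cases hge : (m : Int) + 1 ≤ s + count.getD ((m : Int) + 1) 0
    · rw [if_pos hge]
      by_contra hne
      have hlt : hA < (m : Int) + 1 := by omega
      have := hc ((m : Int) + 1) hlt
      omega
    · rw [if_neg hge]
      have hne : hA ≠ (m : Int) + 1 := by
        intro h
        have hbb := hb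
        rw [h] at hbb
        omega
      refine ih _ (by omega) (by omega) ?_
      rw [← hclip] at hs'
      omega

-- A's i10 0/1-sum is the count of elements ≥ 10
theorem pvI10_eq (l : List Int) :
    (l.map (fun c => if 10 ≤ c then (1 : Int) else 0)).sum = pvF l 10 := by
  induction l with
  | nil => simp [pvF]
  | cons c r ih => rw [List.map_cons, List.sum_cons, pvF_cons, ih]

-- ===== VERDICT (by name: the statement is the Claim_ definition above) =====
theorem compute_metrics_from_publications_spec : Claim_equal_compute_metrics_from_publications := by
  intro publications _
  unfold Spec_compute_metrics_from_publications
  simp only [compute_metrics_from_publications, compute_metrics_from_publications_alt]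
  set cs := publications.map pvCit with hcs
  set L := PySem.List.sorted cs (fun x => x) true with hL
  have hperm : L.Perm cs := PySem.List.sorted_perm cs (fun x => x) true
  have hpair : L.Pairwise (fun a b => b ≤ a) :=
    PySem.List.sorted_pairwise_rev cs (fun x => x)
  have hlen : L.length = cs.length := hperm.length_eq
  have hlen2 : cs.length = publications.length := by rw [hcs, List.length_map]
  have hFeq : ∀ k : Int, pvF L k = pvF cs k := by
    intro k; unfold pvF; rw [hperm.countP_eq]
  -- B's fold
  rw [pvFold_triple (publications.length : Int) publications 0 0 PySem.Dict.empty]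
  simp only
  -- three components
  have htot : L.sum = 0 + (publications.map pvCit).sum := by
    rw [hperm.sum_eq, hcs]; ring
  have hi10 : (L.map (fun c => if 10 ≤ c then (1 : Int) else 0)).sum
      = 0 + pvF (publications.map pvCit) 10 := by
    rw [pvI10_eq, hFeq, hcs]; ring
  -- h component
  have hA_eq : pvHLoop L 1 0 = pvCA L 1 := by
    have := pvHLoop_eq L hpair 1
    simpa using this
  set hA := pvCA L 1 with hhA
  have h0 : 0 ≤ hA := pvCA_nonneg L 1
  have hAn : hA ≤ (cs.length : Int) := by
    have := pvCA_le_length L 1; rw [hlen] at this; exact this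
  have hb : hA ≤ pvF cs hA := by
    have := pvCA_lower L hpair 1
    rw [show pvCA L 1 + 1 - 1 = pvCA L 1 by ring] at this
    rw [← hFeq]; exact this
  have hc : ∀ k : Int, hA < k → pvF cs k < k := by
    intro k hk
    have := pvCA_upper L hpair 1 k hk
    rw [show k + 1 - 1 = k by ring] at this
    rw [← hFeq]; exact this
  have hscan : pvScan
      ((publications.map (fun p => pvClip (publications.length) (pvCit p))).foldl
        (fun d x => d.insert x (d.getD x 0 + 1)) PySem.Dict.empty)
      (Int.toNat (publications.length)) 0 = hA := by
    have hmap : (publications.map (fun p => pvClip (publications.length) (pvCit p)))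
        = cs.map (pvClip cs.length) := by
      rw [hcs, List.map_map, hlen2]; rfl
    rw [hmap]
    refine pvScan_eq cs _ hA ?_ hb hc h0 (Int.toNat (publications.length : Int)) 0 ?_ ?_ ?_
    · intro k
      rw [PySem.Dict.getD_foldl_insert_add_one]
      simp [PySem.Dict.getD_empty]
    · rw [Int.toNat_of_nonneg (Int.natCast_nonneg _)]
      omega
    · rw [Int.toNat_of_nonneg (Int.natCast_nonneg _)]
      omega
    · rw [Int.toNat_of_nonneg (Int.natCast_nonneg _)]
      rw [show ((publications.length : Int)) = ((cs.length : Int)) from by rw [hlen2]]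
      exact (pvF_clip_top cs (cs.length)).symm
  rw [hA_eq, htot, hi10, ← hscan]
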